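-- pv_equiv track=rewrite | github.com/sr606/Automated-3nf-data-modeling | fk_detector.py | _are_datatypes_compatible
-- ===== SOURCE A (Python) =====
-- def _are_datatypes_compatible(dtype1: str, dtype2: str) -> bool:
--     """Check if two Oracle datatypes are compatible for FK relationship"""
--     # Extract base types
--     base1 = dtype1.split('(')[0].upper()
--     base2 = dtype2.split('(')[0].upper()
--
--     # Compatible type groups
--     compatible_groups = [
--         {'NUMBER', 'INTEGER', 'INT'},
--         {'VARCHAR2', 'VARCHAR', 'CHAR', 'NVARCHAR2'},
--         {'DATE', 'TIMESTAMP'},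
--     ]
--
--     if base1 == base2:
--         return True
--
--     for group in compatible_groups:
--         if base1 in group and base2 in group:
--             return True
--
--     return False
-- ===== SOURCE B (Python) =====
-- # B: normalize each dtype to a canonical representative once, then compare representatives;
-- # no pairwise group-membership test and no explicit equality short-circuit.
-- _CANONICAL = {
--     'INTEGER': 'NUMBER', 'INT': 'NUMBER',
--     'VARCHAR': 'VARCHAR2', 'CHAR': 'VARCHAR2', 'NVARCHAR2': 'VARCHAR2',
--     'TIMESTAMP': 'DATE',
-- }
--
-- def _canon(dtype):
--     base = dtype.split('(')[0].upper()
--     return _CANONICAL.get(base, base)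
--
-- def _are_datatypes_compatible(dtype1: str, dtype2: str) -> bool:
--     return _canon(dtype1) == _canon(dtype2)
-- ===== Notes on version B (the rewrite author's own statement) =====
-- stated objective: simpler
-- what changed: B normalizes each dtype once to a canonical representative (aliases mapped to their group's representative, everything else left as-is) and returns equality of the two representatives, eliminating A's equality short-circuit and the pairwise scan over group sets entirely.
import Mathlib
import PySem

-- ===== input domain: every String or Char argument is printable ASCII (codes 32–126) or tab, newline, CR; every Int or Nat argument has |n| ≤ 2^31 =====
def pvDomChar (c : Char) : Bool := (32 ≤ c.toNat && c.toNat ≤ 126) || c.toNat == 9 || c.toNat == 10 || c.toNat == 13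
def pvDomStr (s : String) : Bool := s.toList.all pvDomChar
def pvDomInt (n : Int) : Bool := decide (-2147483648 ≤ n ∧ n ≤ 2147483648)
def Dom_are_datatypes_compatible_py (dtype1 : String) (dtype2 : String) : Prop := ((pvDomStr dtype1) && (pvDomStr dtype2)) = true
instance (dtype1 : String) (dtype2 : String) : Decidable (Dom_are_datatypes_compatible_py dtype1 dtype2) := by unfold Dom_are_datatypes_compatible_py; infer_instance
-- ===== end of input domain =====

-- B normalizes each dtype once to a canonical representative and compares the representatives,
-- replacing A's equality short-circuit plus pairwise scan over group sets; objective: simpler.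

-- ===== PORT A =====
def are_datatypes_compatible_py (dtype1 : String) (dtype2 : String) : Bool :=
  let base1 := PySem.Str.upper (((PySem.Str.split? dtype1 "(").getD []).headD "")
  let base2 := PySem.Str.upper (((PySem.Str.split? dtype2 "(").getD []).headD "")
  let compatible_groups : List (PySem.Set String) :=
    [PySem.Set.ofList ["NUMBER", "INTEGER", "INT"],
     PySem.Set.ofList ["VARCHAR2", "VARCHAR", "CHAR", "NVARCHAR2"],
     PySem.Set.ofList ["DATE", "TIMESTAMP"]]
  if base1 == base2 then true
  else compatible_groups.any (fun g => PySem.Set.contains g base1 && PySem.Set.contains g base2)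

-- ===== PORT B =====
def pvCanonical : PySem.Dict String String :=
  PySem.Dict.ofList
    [("INTEGER", "NUMBER"), ("INT", "NUMBER"),
     ("VARCHAR", "VARCHAR2"), ("CHAR", "VARCHAR2"), ("NVARCHAR2", "VARCHAR2"),
     ("TIMESTAMP", "DATE")]

def pvCanon (dtype : String) : String :=
  let base := PySem.Str.upper (((PySem.Str.split? dtype "(").getD []).headD "")
  pvCanonical.getD base base

def are_datatypes_compatible_py_alt (dtype1 : String) (dtype2 : String) : Bool :=
  pvCanon dtype1 == pvCanon dtype2

-- ===== PRECONDITION & SPEC =====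
def Spec_are_datatypes_compatible_py (dtype1 : String) (dtype2 : String) (out : Bool) : Prop := out = are_datatypes_compatible_py_alt dtype1 dtype2
instance (dtype1 : String) (dtype2 : String) (out : Bool) : Decidable (Spec_are_datatypes_compatible_py dtype1 dtype2 out) := by unfold Spec_are_datatypes_compatible_py; infer_instance

-- ===== CLAIM (what is proved, stated in full; the proofs are below) =====
def Claim_equal_are_datatypes_compatible_py : Prop := ∀ (dtype1 : String) (dtype2 : String), Dom_are_datatypes_compatible_py dtype1 dtype2 → Spec_are_datatypes_compatible_py dtype1 dtype2 (are_datatypes_compatible_py dtype1 dtype2)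

-- ===== LEMMAS AND PROOFS =====

theorem pvCanonical_eq_mk : pvCanonical = PySem.Dict.mk
    [("INTEGER", "NUMBER"), ("INT", "NUMBER"),
     ("VARCHAR", "VARCHAR2"), ("CHAR", "VARCHAR2"), ("NVARCHAR2", "VARCHAR2"),
     ("TIMESTAMP", "DATE")] := by decide

-- any base string is one of the nine grouped tokens, or (bundled facts) outside all of them
theorem pvClassify (b : String) :
    b = "NUMBER" ∨ b = "INTEGER" ∨ b = "INT" ∨
    b = "VARCHAR2" ∨ b = "VARCHAR" ∨ b = "CHAR" ∨ b = "NVARCHAR2" ∨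
    b = "DATE" ∨ b = "TIMESTAMP" ∨
    (PySem.Set.contains (PySem.Set.ofList ["NUMBER", "INTEGER", "INT"]) b = false ∧
     PySem.Set.contains (PySem.Set.ofList ["VARCHAR2", "VARCHAR", "CHAR", "NVARCHAR2"]) b = false ∧
     PySem.Set.contains (PySem.Set.ofList ["DATE", "TIMESTAMP"]) b = false ∧
     pvCanonical.getD b b = b ∧
     "NUMBER" ≠ b ∧ "INTEGER" ≠ b ∧ "INT" ≠ b ∧ "VARCHAR2" ≠ b ∧ "VARCHAR" ≠ b ∧
     "CHAR" ≠ b ∧ "NVARCHAR2" ≠ b ∧ "DATE" ≠ b ∧ "TIMESTAMP" ≠ b) := by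
  by_cases h1 : b = "NUMBER"; · exact Or.inl h1
  by_cases h2 : b = "INTEGER"; · exact Or.inr (Or.inl h2)
  by_cases h3 : b = "INT"; · exact Or.inr (Or.inr (Or.inl h3))
  by_cases h4 : b = "VARCHAR2"; · exact Or.inr (Or.inr (Or.inr (Or.inl h4)))
  by_cases h5 : b = "VARCHAR"; · exact Or.inr (Or.inr (Or.inr (Or.inr (Or.inl h5))))
  by_cases h6 : b = "CHAR"; · exact Or.inr (Or.inr (Or.inr (Or.inr (Or.inr (Or.inl h6)))))
  by_cases h7 : b = "NVARCHAR2"; · exact Or.inr (Or.inr (Or.inr (Or.inr (Or.inr (Or.inr (Or.inl h7))))))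
  by_cases h8 : b = "DATE"; · exact Or.inr (Or.inr (Or.inr (Or.inr (Or.inr (Or.inr (Or.inr (Or.inl h8)))))))
  by_cases h9 : b = "TIMESTAMP"; · exact Or.inr (Or.inr (Or.inr (Or.inr (Or.inr (Or.inr (Or.inr (Or.inr (Or.inl h9))))))))
  refine Or.inr (Or.inr (Or.inr (Or.inr (Or.inr (Or.inr (Or.inr (Or.inr (Or.inr
    ⟨?_, ?_, ?_, ?_, Ne.symm h1, Ne.symm h2, Ne.symm h3, Ne.symm h4, Ne.symm h5,
     Ne.symm h6, Ne.symm h7, Ne.symm h8, Ne.symm h9⟩))))))))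
  · simp [PySem.Set.contains, PySem.Set.ofList, h1, h2, h3]
  · simp [PySem.Set.contains, PySem.Set.ofList, h4, h5, h6, h7]
  · simp [PySem.Set.contains, PySem.Set.ofList, h8, h9]
  · have g2 : ("INTEGER" == b) = false := beq_eq_false_iff_ne.mpr (Ne.symm h2)
    have g3 : ("INT" == b) = false := beq_eq_false_iff_ne.mpr (Ne.symm h3)
    have g5 : ("VARCHAR" == b) = false := beq_eq_false_iff_ne.mpr (Ne.symm h5)
    have g6 : ("CHAR" == b) = false := beq_eq_false_iff_ne.mpr (Ne.symm h6)
    have g7 : ("NVARCHAR2" == b) = false := beq_eq_false_iff_ne.mpr (Ne.symm h7)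
    have g9 : ("TIMESTAMP" == b) = false := beq_eq_false_iff_ne.mpr (Ne.symm h9)
    rw [pvCanonical_eq_mk]
    simp [PySem.Dict.getD, PySem.Dict.get?, List.find?, g2, g3, g5, g6, g7, g9]

-- the two results agree as a function of the two (arbitrary) base strings
theorem pvCore (b1 b2 : String) :
    (if b1 == b2 then true
     else ([PySem.Set.ofList ["NUMBER", "INTEGER", "INT"],
            PySem.Set.ofList ["VARCHAR2", "VARCHAR", "CHAR", "NVARCHAR2"],
            PySem.Set.ofList ["DATE", "TIMESTAMP"]] : List (PySem.Set String)).any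
           (fun g => PySem.Set.contains g b1 && PySem.Set.contains g b2))
      = (pvCanonical.getD b1 b1 == pvCanonical.getD b2 b2) := by
  rcases pvClassify b1 with h|h|h|h|h|h|h|h|h|⟨c0,c1,c2,hid,n1,n2,n3,n4,n5,n6,n7,n8,n9⟩ <;>
    rcases pvClassify b2 with h'|h'|h'|h'|h'|h'|h'|h'|h'|⟨d0,d1,d2,hid',m1,m2,m3,m4,m5,m6,m7,m8,m9⟩ <;>
      subst_vars <;>
      first
        | decide
        | (by_cases hbb : b1 = b2 <;>
            simp_all [List.any_cons, List.any_nil, beq_iff_eq, pvCanonical_eq_mk,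
                      PySem.Dict.getD, PySem.Dict.get?, List.find?])
        | simp_all [List.any_cons, List.any_nil, beq_iff_eq, pvCanonical_eq_mk,
                    PySem.Dict.getD, PySem.Dict.get?, List.find?]

-- ===== VERDICT (by name: the statement is the Claim_ definition above) =====
theorem are_datatypes_compatible_py_spec : Claim_equal_are_datatypes_compatible_py := by
  intro dtype1 dtype2 _
  unfold Spec_are_datatypes_compatible_py are_datatypes_compatible_py are_datatypes_compatible_py_alt pvCanon
  exact pvCore _ _
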